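-- pv_equiv track=rewrite | github.com/Yolwoocle/td_algo_midl_l1 | td03/exo3.py | dernier_negatif_dichotomie
-- ===== SOURCE A (Python) =====
-- def est_croissant(tab: list) -> bool:
--     for i in range(len(tab) - 1):
--         if tab[i] > tab[i+1]:
--             return False
--     return True
--
-- def dernier_negatif_dichotomie(tab: list[int]):
--     assert len(tab) > 0
--     assert est_croissant(tab)
--     assert tab[0] < 0
--     assert tab[len(tab)-1] > 0
--     def invariant():
--         return 0<=i<j<len(tab) and tab[i] <= 0 and tab[j]>0
--
--     i = 0
--     j = len(tab)-1
--
--     assert invariant()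
--     while i+1 < j:
--         m = (i+j)//2
--         if tab[m] > 0:
--             j = m
--         else:
--             i = m
--         assert invariant()
--     assert invariant() and i+1 >= j
--     return i
-- ===== SOURCE B (Python) =====
-- def est_croissant(tab: list) -> bool:
--     for i in range(len(tab) - 1):
--         if tab[i] > tab[i+1]:
--             return False
--     return True
--
-- def dernier_negatif_dichotomie(tab: list[int]):
--     assert len(tab) > 0
--     assert est_croissant(tab)
--     assert tab[0] < 0
--     assert tab[len(tab)-1] > 0
--     res = 0
--     for k in range(len(tab)):
--         if tab[k] <= 0:
--             res = k
--     return res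
-- ===== Notes on version B (the rewrite author's own statement) =====
-- stated objective: simpler
-- what changed: Replaces the dichotomy (two-pointer binary search with an inner invariant) by a single left-to-right scan that remembers the last index whose element is <= 0; the same asserts are kept, so exception behaviour is unchanged.
import Mathlib
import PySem

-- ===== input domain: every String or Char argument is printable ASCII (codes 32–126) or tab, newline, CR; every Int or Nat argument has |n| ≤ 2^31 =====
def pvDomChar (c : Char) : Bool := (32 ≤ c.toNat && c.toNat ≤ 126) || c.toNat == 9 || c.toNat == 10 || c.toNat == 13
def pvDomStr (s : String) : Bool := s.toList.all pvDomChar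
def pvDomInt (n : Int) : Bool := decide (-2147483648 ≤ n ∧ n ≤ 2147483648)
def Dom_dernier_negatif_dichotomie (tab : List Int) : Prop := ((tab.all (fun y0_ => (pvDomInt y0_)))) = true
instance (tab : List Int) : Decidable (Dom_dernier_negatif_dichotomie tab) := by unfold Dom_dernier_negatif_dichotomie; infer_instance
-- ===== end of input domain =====

-- B replaces the binary search by a single left-to-right scan keeping the last index whose
-- element is <= 0; Source B keeps A's asserts verbatim, so exception behaviour is identical
-- (assert-violating inputs are outside Pre_).

-- ===== PORT A =====
-- the while loop of A; under Pre_ every tab[m] access is in range, so the .getD 0 never fires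
def dichoLoop (tab : List Int) (i j : Int) : Int :=
  if _h : i + 1 < j then
    let m := PySem.Int.floordiv (i + j) 2
    if (PySem.List.pyGet? tab m).getD 0 > 0 then dichoLoop tab i m
    else dichoLoop tab m j
  else i
termination_by (j - i).toNat
decreasing_by
  · have := PySem.Int.floordiv_two_mid_bounds (lo := i + 1) (hi := j - 1) (by omega)
    simp only [show i + 1 + (j - 1) = i + j by ring] at this
    omega
  · have := PySem.Int.floordiv_two_mid_bounds (lo := i + 1) (hi := j - 1) (by omega)
    simp only [show i + 1 + (j - 1) = i + j by ring] at this
    omega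

-- the asserts raise exactly outside Pre_; inside Pre_ they pass and do not affect the value
def dernier_negatif_dichotomie (tab : List Int) : Int :=
  dichoLoop tab 0 ((tab.length : Int) - 1)

-- ===== PORT B =====
def dernier_negatif_dichotomie_alt (tab : List Int) : Int :=
  (PySem.List.pyRange 0 (tab.length : Int) 1).foldl
    (fun res k => if (PySem.List.pyGet? tab k).getD 0 ≤ 0 then k else res) 0

-- ===== PRECONDITION & SPEC =====
-- Pre_ = exactly the four asserts of A (kept verbatim in B): nonempty, non-decreasing,
-- first element < 0, last element > 0; outside it both programs raise AssertionError.
def Pre_dernier_negatif_dichotomie (tab : List Int) : Prop :=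
  tab ≠ [] ∧ List.Pairwise (fun a b : Int => a ≤ b) tab ∧ tab.headD 0 < 0 ∧ tab.getLastD 0 > 0
instance (tab : List Int) : Decidable (Pre_dernier_negatif_dichotomie tab) := by
  unfold Pre_dernier_negatif_dichotomie; infer_instance

def pvWitness_dernier_negatif_dichotomie : List Int := [-3, -1, 0, 2, 5]

def Spec_dernier_negatif_dichotomie (tab : List Int) (out : Int) : Prop := out = dernier_negatif_dichotomie_alt tab
instance (tab : List Int) (out : Int) : Decidable (Spec_dernier_negatif_dichotomie tab out) := by unfold Spec_dernier_negatif_dichotomie; infer_instance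

-- ===== CLAIM (what is proved, stated in full; the proofs are below) =====
def Claim_equal_dernier_negatif_dichotomie : Prop := ∀ (tab : List Int), Dom_dernier_negatif_dichotomie tab → Pre_dernier_negatif_dichotomie tab → Spec_dernier_negatif_dichotomie tab (dernier_negatif_dichotomie tab)

-- ===== LEMMAS AND PROOFS =====

-- reading tab[k] for an in-range nonnegative Int index
theorem getv_eq (tab : List Int) (k : Int) (h0 : 0 ≤ k) (h1 : k < (tab.length : Int)) :
    (PySem.List.pyGet? tab k).getD 0 = tab[k.toNat]! := by
  rw [PySem.List.pyGet?_eq_some_getElem tab h0 h1]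
  simp [List.getElem!_eq_getElem?_getD, List.getElem?_eq_getElem (by omega : k.toNat < tab.length)]

-- sortedness at indices
theorem sorted_get (tab : List Int) (hp : List.Pairwise (fun a b : Int => a ≤ b) tab)
    (a b : Nat) (hab : a ≤ b) (hb : b < tab.length) : tab[a]! ≤ tab[b]! := by
  have ha : a < tab.length := by omega
  rw [List.getElem!_eq_getElem?_getD, List.getElem!_eq_getElem?_getD,
      List.getElem?_eq_getElem ha, List.getElem?_eq_getElem hb]
  rcases Nat.lt_or_eq_of_le hab with h | h
  · exact List.pairwise_iff_getElem.mp hp a b ha hb h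
  · subst h; simp

-- A's loop returns an index d with i ≤ d, d+1 ≤ j, tab[d] ≤ 0 and tab[d+1] > 0
theorem dichoLoop_good (tab : List Int) (i j : Int)
    (h0 : 0 ≤ i) (hij : i < j) (hj : j < (tab.length : Int))
    (hi0 : tab[i.toNat]! ≤ 0) (hj0 : tab[j.toNat]! > 0) :
    i ≤ dichoLoop tab i j ∧ dichoLoop tab i j + 1 ≤ j ∧
      tab[(dichoLoop tab i j).toNat]! ≤ 0 ∧ tab[((dichoLoop tab i j) + 1).toNat]! > 0 := by
  fun_induction dichoLoop tab i j with
  | case1 i j h m hc ih =>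
    have hb := PySem.Int.floordiv_two_mid_bounds (lo := i + 1) (hi := j - 1) (by omega)
    simp only [show i + 1 + (j - 1) = i + j by ring] at hb
    rw [getv_eq tab m (by omega) (by omega)] at hc
    obtain ⟨a1, a2, a3, a4⟩ := ih h0 (by omega) (by omega) hi0 hc
    exact ⟨a1, by omega, a3, a4⟩
  | case2 i j h m hc ih =>
    have hb := PySem.Int.floordiv_two_mid_bounds (lo := i + 1) (hi := j - 1) (by omega)
    simp only [show i + 1 + (j - 1) = i + j by ring] at hb
    rw [getv_eq tab m (by omega) (by omega)] at hc
    obtain ⟨a1, a2, a3, a4⟩ := ih (by omega) (by omega) hj (by omega) hj0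
    exact ⟨by omega, a2, a3, a4⟩
  | case3 i j h =>
    refine ⟨le_refl _, by omega, hi0, ?_⟩
    have : j = i + 1 := by omega
    subst this; exact hj0

-- B's fold over range(0, m) keeps the last index k < m with tab[k] ≤ 0
theorem fold_aux (tab : List Int) (h00 : tab[0]! ≤ 0) (m : Nat) (hm1 : 1 ≤ m) (hmn : m ≤ tab.length) :
    let b := ((List.range m).map (fun (k : Nat) => (0:Int) + k)).foldl
      (fun res k => if (PySem.List.pyGet? tab k).getD 0 ≤ 0 then k else res) 0
    0 ≤ b ∧ b < (m:Int) ∧ tab[b.toNat]! ≤ 0 ∧ ∀ k : Nat, b < (k:Int) → k < m → tab[k]! > 0 := by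
  intro b
  induction m with
  | zero => omega
  | succ m ih =>
    by_cases hm0 : m = 0
    · subst hm0
      have : b = if (PySem.List.pyGet? tab 0).getD 0 ≤ 0 then (0:Int) else 0 := by
        simp [b, List.range_succ]
      have hb : b = 0 := by rw [this]; split <;> rfl
      refine ⟨by omega, by omega, by rw [hb]; simpa using h00, ?_⟩
      intro k hk1 hk2; omega
    · have hm1' : 1 ≤ m := by omega
      have hrec := ih hm1' (by omega)
      set bm := ((List.range m).map (fun (k : Nat) => (0:Int) + k)).foldl
        (fun res k => if (PySem.List.pyGet? tab k).getD 0 ≤ 0 then k else res) 0 with hbm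
      have hsplit : b = if (PySem.List.pyGet? tab (0 + (m:Int))).getD 0 ≤ 0 then (0:Int) + (m:Int) else bm := by
        simp only [b, List.range_succ, List.map_append, List.foldl_append, List.map_cons,
          List.map_nil, List.foldl_cons, List.foldl_nil, hbm]
      rw [getv_eq tab (0 + (m:Int)) (by omega) (by omega)] at hsplit
      have hcast : ((0:Int) + (m:Int)).toNat = m := by omega
      rw [hcast] at hsplit
      obtain ⟨a1, a2, a3, a4⟩ := hrec
      by_cases hv : tab[m]! ≤ 0
      · rw [hsplit, if_pos hv]
        refine ⟨by omega, by omega, by simpa [hcast] using hv, ?_⟩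
        intro k hk1 hk2; omega
      · rw [hsplit, if_neg hv]
        refine ⟨a1, by omega, a3, ?_⟩
        intro k hk1 hk2
        by_cases hkm : k = m
        · subst hkm; omega
        · exact a4 k hk1 (by omega)

-- B's result is the last index whose element is ≤ 0
theorem fold_last (tab : List Int) (hne : tab ≠ []) (h00 : tab[0]! ≤ 0) :
    0 ≤ dernier_negatif_dichotomie_alt tab ∧
      (dernier_negatif_dichotomie_alt tab) < (tab.length : Int) ∧
      tab[(dernier_negatif_dichotomie_alt tab).toNat]! ≤ 0 ∧
      ∀ k : Nat, (dernier_negatif_dichotomie_alt tab) < (k : Int) → k < tab.length → tab[k]! > 0 := by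
  have hn : 1 ≤ tab.length := by
    cases tab with
    | nil => simp at hne
    | cons h t => simp
  have := fold_aux tab h00 tab.length hn (le_refl _)
  have heq : dernier_negatif_dichotomie_alt tab = ((List.range tab.length).map (fun (k : Nat) => (0:Int) + k)).foldl
      (fun res k => if (PySem.List.pyGet? tab k).getD 0 ≤ 0 then k else res) 0 := by
    unfold dernier_negatif_dichotomie_alt
    rw [PySem.List.pyRange_one]
    norm_num
  rw [heq]; exact this

-- bridging the Pre_ forms headD / getLastD to getElem!
theorem headD_eq (tab : List Int) (hne : tab ≠ []) : tab.headD 0 = tab[0]! := by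
  cases tab with
  | nil => simp at hne
  | cons x xs => simp

theorem getLastD_eq (tab : List Int) : tab.getLastD 0 = tab[tab.length - 1]! := by
  rw [List.getLastD_eq_getLast?, List.getLast?_eq_getElem?, List.getElem!_eq_getElem?_getD]
  rfl

-- ===== VERDICT (by name: the statement is the Claim_ definition above) =====
theorem dernier_negatif_dichotomie_spec : Claim_equal_dernier_negatif_dichotomie := by
  intro tab _ hpre
  obtain ⟨hne, hp, hh, hl⟩ := hpre
  have h0v : tab[0]! < 0 := by rwa [headD_eq tab hne] at hh
  have hlv : tab[tab.length - 1]! > 0 := by rwa [getLastD_eq tab] at hl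
  have hn1 : 1 ≤ tab.length := by
    cases tab with
    | nil => simp at hne
    | cons h t => simp
  have hn2 : 2 ≤ tab.length := by
    by_contra hlt
    have : tab.length = 1 := by omega
    rw [this, show (1-1 : Nat) = 0 from rfl] at hlv
    omega
  have hcastj : (((tab.length : Int) - 1)).toNat = tab.length - 1 := by omega
  have hA := dichoLoop_good tab 0 ((tab.length : Int) - 1) (le_refl 0) (by omega) (by omega)
    (by simpa using h0v.le) (by rw [hcastj]; exact hlv)
  obtain ⟨hd0, hd1, hd2, hd3⟩ := hA
  have hB := fold_last tab hne h0v.le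
  obtain ⟨hb0, hb1, hb2, hb3⟩ := hB
  set d := dichoLoop tab 0 ((tab.length : Int) - 1) with hd
  set b := dernier_negatif_dichotomie_alt tab with hb
  have hdb : d ≤ b := by
    by_contra hgt
    have hk : b < ((d.toNat : Nat) : Int) := by omega
    have := hb3 d.toNat hk (by omega)
    omega
  have hbd : ¬ d < b := by
    intro hlt2
    have hmono := sorted_get tab hp (d + 1).toNat b.toNat (by omega) (by omega)
    omega
  have : d = b := by omega
  show dernier_negatif_dichotomie tab = dernier_negatif_dichotomie_alt tab
  unfold dernier_negatif_dichotomie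
  rw [← hd, ← hb, this]
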